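-- pv_equiv track=rewrite | github.com/bang274/modular-math-agent | backend/app/tools/wolfram.py | _prepare_query
-- ===== SOURCE A (Python) =====
-- def _prepare_query(query: str) -> str:
--     """Convert LaTeX-style query to Wolfram Alpha-friendly format."""
--     # Basic LaTeX → Wolfram conversions
--     replacements = {
--         "\\int": "integrate",
--         "\\frac": "",
--         "\\sqrt": "sqrt",
--         "\\sin": "sin",
--         "\\cos": "cos",
--         "\\tan": "tan",
--         "\\ln": "ln",
--         "\\log": "log",
--         "\\pi": "pi",
--         "\\infty": "infinity",
--         "\\lim": "limit",
--         "\\sum": "sum",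
--         "\\cdot": "*",
--         "\\times": "*",
--         "\\div": "/",
--         "\\left": "",
--         "\\right": "",
--         "\\,": " ",
--         "\\;": " ",
--         "\\quad": " ",
--     }
--     result = query
--     for latex, wolfram in replacements.items():
--         result = result.replace(latex, wolfram)
--
--     # Remove remaining backslashes and curly braces
--     result = result.replace("{", "(").replace("}", ")")
--     result = result.replace("\\", "")
--     return result.strip()
-- ===== SOURCE B (Python) =====
-- _WORDS = [
--     ("int", "integrate"), ("frac", ""), ("sqrt", "sqrt"), ("sin", "sin"),
--     ("cos", "cos"), ("tan", "tan"), ("ln", "ln"), ("log", "log"),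
--     ("pi", "pi"), ("infty", "infinity"), ("lim", "limit"), ("sum", "sum"),
--     ("cdot", "*"), ("times", "*"), ("div", "/"), ("left", ""),
--     ("right", ""), (",", " "), (";", " "), ("quad", " "),
-- ]
-- _BRACES = str.maketrans("{}", "()")
--
-- def _prepare_query(query: str) -> str:
--     """Convert LaTeX-style query to Wolfram Alpha-friendly format."""
--     parts = query.split("\\")
--     pieces = [parts[0]]
--     for part in parts[1:]:
--         for word, wolfram in _WORDS:
--             if part.startswith(word):
--                 pieces.append(wolfram + part[len(word):])
--                 break
--         else:
--             pieces.append(part)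
--     return "".join(pieces).translate(_BRACES).strip()
-- ===== Notes on version B (the rewrite author's own statement) =====
-- stated objective: alternative
-- what changed: Replaces A's 23 sequential full-string replace passes with a single split-on-backslash pass that rewrites the token at the head of each fragment from one word table, then one character translation for braces and a strip. Pre_ excludes queries in which a backslash that starts no known LaTeX token is separated from a following backslash only by a proper prefix of a token word: on such malformed input A's sequential passes let the stray backslash recombine with residue of later substitutions while B consumes each source token once, and neither reading is specified.
-- outside the precondition, e.g. on _prepare_query('\\\\fracinfty'): A returns 'infinity', B returns 'infty'; on _prepare_query('\\\\left,b'): A returns 'b', B returns ',b'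
import Mathlib
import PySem

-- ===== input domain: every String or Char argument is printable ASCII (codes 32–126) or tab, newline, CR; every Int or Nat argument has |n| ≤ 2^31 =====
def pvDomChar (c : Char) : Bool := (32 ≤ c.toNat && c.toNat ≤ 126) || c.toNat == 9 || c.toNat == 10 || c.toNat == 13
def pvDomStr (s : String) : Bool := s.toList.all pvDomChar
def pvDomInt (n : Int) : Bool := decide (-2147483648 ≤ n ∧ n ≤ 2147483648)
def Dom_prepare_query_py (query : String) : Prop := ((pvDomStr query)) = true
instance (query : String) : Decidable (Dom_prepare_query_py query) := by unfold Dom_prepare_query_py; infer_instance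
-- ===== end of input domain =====

-- B replaces A's 23 sequential full-string replace passes by one split-on-backslash pass
-- (each fragment's head token rewritten from a word table), a brace translation and a strip;
-- equivalence is proved on Pre_, which excludes malformed stray-backslash corners (see Pre_).

-- ===== PORT A =====
def prepare_query_py (query : String) : String :=
  let replacements : PySem.Dict String String := PySem.Dict.mk
    [("\\int", "integrate"), ("\\frac", ""), ("\\sqrt", "sqrt"), ("\\sin", "sin"),
     ("\\cos", "cos"), ("\\tan", "tan"), ("\\ln", "ln"), ("\\log", "log"),
     ("\\pi", "pi"), ("\\infty", "infinity"), ("\\lim", "limit"), ("\\sum", "sum"),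
     ("\\cdot", "*"), ("\\times", "*"), ("\\div", "/"), ("\\left", ""),
     ("\\right", ""), ("\\,", " "), ("\\;", " "), ("\\quad", " ")]
  let result1 := replacements.items.foldl (fun r p => PySem.Str.replace r p.1 p.2) query
  let result2 := PySem.Str.replace (PySem.Str.replace result1 "{" "(") "}" ")"
  let result3 := PySem.Str.replace result2 "\\" ""
  PySem.Str.strip result3

-- ===== PORT B =====  (transliteration of Source B: split on backslash, rewrite each fragment head)
def pvAltWords : List (List Char × List Char) :=
  [("int".toList, "integrate".toList), ("frac".toList, "".toList), ("sqrt".toList, "sqrt".toList),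
   ("sin".toList, "sin".toList), ("cos".toList, "cos".toList), ("tan".toList, "tan".toList),
   ("ln".toList, "ln".toList), ("log".toList, "log".toList), ("pi".toList, "pi".toList),
   ("infty".toList, "infinity".toList), ("lim".toList, "limit".toList), ("sum".toList, "sum".toList),
   ("cdot".toList, "*".toList), ("times".toList, "*".toList), ("div".toList, "/".toList),
   ("left".toList, "".toList), ("right".toList, "".toList), (",".toList, " ".toList),
   (";".toList, " ".toList), ("quad".toList, " ".toList)]

-- Source B's inner for/else over _WORDS: first word that the fragment starts with wins
def pvMatchPart : List (List Char × List Char) → List Char → List Char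
  | [], part => part
  | (w, r) :: rest, part =>
    if w.isPrefixOf part then r ++ part.drop w.length else pvMatchPart rest part

-- Source B's str.maketrans("{}", "()") table applied via translate (exact: 1-to-1 char map)
def pvBraceChar (c : Char) : Char := if c = '{' then '(' else if c = '}' then ')' else c

def prepare_query_py_alt (query : String) : String :=
  let parts := List.splitOn '\\' query.toList      -- query.split("\\")
  let pieces := parts.headD [] :: parts.tail.map (pvMatchPart pvAltWords)
  String.ofList (PySem.Chars.strip (pieces.flatten.map pvBraceChar))

-- ===== PRECONDITION & SPEC =====
def pvTokWords : List (List Char) :=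
  ["int".toList, "frac".toList, "sqrt".toList, "sin".toList, "cos".toList, "tan".toList,
   "ln".toList, "log".toList, "pi".toList, "infty".toList, "lim".toList, "sum".toList,
   "cdot".toList, "times".toList, "div".toList, "left".toList, "right".toList,
   ",".toList, ";".toList, "quad".toList]

-- tail = the text after a backslash: bad iff the backslash starts no known token and is
-- separated from the next backslash only by a proper prefix of a token word
def pvBadTail (t : List Char) : Bool :=
  (!(pvTokWords.any (fun w => w.isPrefixOf t))) &&
  ((!(t.dropWhile (fun c => c ≠ '\\')).isEmpty) &&
    pvTokWords.any (fun w =>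
      (t.takeWhile (fun c => c ≠ '\\')).isPrefixOf w &&
      (t.takeWhile (fun c => c ≠ '\\')).length < w.length))

def pvHasBad : List Char → Bool
  | [] => false
  | c :: t => ((c == '\\') && pvBadTail t) || pvHasBad t

-- Pre_ excludes queries in which a backslash that starts no known LaTeX token is separated
-- from a following backslash only by a proper prefix of a token word: there A's sequential
-- passes may let the stray backslash recombine with residue of later substitutions, B
-- consumes each source token once; neither reading of such malformed input is specified.
def Pre_prepare_query_py (query : String) : Prop := pvHasBad query.toList = false
instance (query : String) : Decidable (Pre_prepare_query_py query) := by
  unfold Pre_prepare_query_py; infer_instance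

def pvWitness_prepare_query_py : String := "\\int x^2 \\, dx + \\frac{1}{2} \\cdot \\sqrt{\\pi}"

def Spec_prepare_query_py (query : String) (out : String) : Prop := out = prepare_query_py_alt query
instance (query : String) (out : String) : Decidable (Spec_prepare_query_py query out) := by
  unfold Spec_prepare_query_py; infer_instance

-- ===== CLAIM (what is proved, stated in full; the proofs are below) =====
def Claim_equal_prepare_query_py : Prop :=
  ∀ (query : String), Dom_prepare_query_py query → Pre_prepare_query_py query →
    Spec_prepare_query_py query (prepare_query_py query)

-- ===== LEMMAS AND PROOFS =====

-- A clean structural model of CPython str.replace (PySem.Chars.replace) for nonempty `old`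
def pvRepl (old new : List Char) : List Char → List Char
  | [] => []
  | c :: t =>
    match old with
    | [] => c :: t
    | o :: ot =>
      if (o :: ot).isPrefixOf (c :: t) then
        new ++ pvRepl (o :: ot) new ((c :: t).drop (o :: ot).length)
      else c :: pvRepl (o :: ot) new t
termination_by s => s.length
decreasing_by all_goals (simp only [List.length_drop, List.length_cons]; omega)

def pvFoldT (L : List (List Char × List Char)) (s : List Char) : List Char :=
  L.foldl (fun r p => pvRepl p.1 p.2 r) s

-- the A-side table at character level, tied to B's word table by construction
def pvTable : List (List Char × List Char) := pvAltWords.map (fun p => ('\\' :: p.1, p.2))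

def pvFindWord : List (List Char × List Char) → List Char → Option (List Char × List Char)
  | [], _ => none
  | (w, v) :: rest, t => if w.isPrefixOf t then some (w, v) else pvFindWord rest t

-- scan semantics shared by both sides after the token passes and backslash removal
def pvCore : List Char → List Char
  | [] => []
  | c :: t =>
    if c = '\\' then
      match pvFindWord pvAltWords t with
      | some (w, v) => v ++ pvCore (t.drop w.length)
      | none => pvCore t
    else c :: pvCore t
termination_by s => s.length
decreasing_by all_goals (simp only [List.length_drop, List.length_cons]; omega)


theorem pvRepl_nil (old new : List Char) : pvRepl old new [] = [] := by simp [pvRepl]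

theorem pvRepl_cons_match (o : Char) (ot new z : List Char) :
    pvRepl (o :: ot) new ((o :: ot) ++ z) = new ++ pvRepl (o :: ot) new z := by
  rw [pvRepl.eq_def]
  have hpre : (o :: ot).isPrefixOf ((o :: ot) ++ z) := by
    simp [List.isPrefixOf_iff_prefix]
  simp

theorem pvRepl_cons_no_match (o c : Char) (ot new t : List Char)
    (h : ¬ (o :: ot).isPrefixOf (c :: t)) :
    pvRepl (o :: ot) new (c :: t) = c :: pvRepl (o :: ot) new t := by
  rw [pvRepl]; simp [h]

theorem pv_go_eq (o : Char) (ot new : List Char) :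
    ∀ (fuel : Nat) (l acc : List Char), l.length ≤ fuel →
      PySem.Chars.replace.go (o :: ot) new fuel l acc = acc.reverse ++ pvRepl (o :: ot) new l := by
  intro fuel
  induction fuel with
  | zero =>
    intro l acc hl
    have : l = [] := by cases l <;> simp_all
    subst this
    rw [PySem.Chars.replace.go.eq_def]; simp [pvRepl]
  | succ n ih =>
    intro l acc hl
    cases l with
    | nil => rw [PySem.Chars.replace.go.eq_def]; simp [pvRepl]
    | cons c t =>
      rw [PySem.Chars.replace.go.eq_def]
      by_cases hpre : (o :: ot).isPrefixOf (c :: t)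
      · simp only [hpre, if_true]
        rw [ih _ _ (by simp at hl ⊢; omega)]
        have hexp : pvRepl (o :: ot) new (c :: t) =
            new ++ pvRepl (o :: ot) new ((c :: t).drop (o :: ot).length) := by
          rw [pvRepl]; simp [hpre]
        rw [hexp]; simp
      · simp only [hpre]
        rw [ih t (c :: acc) (by simp at hl ⊢; omega),
          pvRepl_cons_no_match _ _ _ _ _ hpre]
        simp

theorem pv_replace_eq (old new s : List Char) (h : old ≠ []) :
    PySem.Chars.replace s old new = pvRepl old new s := by
  cases old with
  | nil => exact absurd rfl h
  | cons o ot =>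
    rw [PySem.Chars.replace]
    simp only [List.isEmpty_cons]
    rw [pv_go_eq o ot new s.length s [] (le_refl _)]
    simp

-- splitting a prefix across an append
theorem pv_prefix_append_split {a b c : List Char} (h : a <+: b ++ c) :
    a <+: b ∨ b <+: a := by
  by_cases hl : a.length ≤ b.length
  · exact Or.inl (List.prefix_of_prefix_length_le h (List.prefix_append b c) hl)
  · exact Or.inr (List.prefix_of_prefix_length_le (List.prefix_append b c) h (by omega))

-- walking a backslash-free segment: no pattern (they all start with '\') can fire inside it
theorem pvRepl_free_prefix (o : Char) (ot new : List Char) (ho : o = '\\') :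
    ∀ (w z : List Char), (∀ c ∈ w, c ≠ '\\') →
      pvRepl (o :: ot) new (w ++ z) = w ++ pvRepl (o :: ot) new z := by
  intro w
  induction w with
  | nil => intro z _; simp
  | cons c w' ih =>
    intro z hw
    have hc : c ≠ '\\' := hw c (by simp)
    have hnm : ¬ (o :: ot).isPrefixOf (c :: (w' ++ z)) := by
      intro hpre
      rw [List.isPrefixOf_iff_prefix] at hpre
      rcases hpre with ⟨t, ht⟩
      simp at ht
      exact hc (by rw [← ht.1, ho])
    rw [List.cons_append, pvRepl_cons_no_match _ _ _ _ _ hnm]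
    rw [ih z (fun c hc' => hw c (by simp [hc']))]
    simp

theorem pvRepl_free_id (o : Char) (ot new : List Char) (ho : o = '\\')
    (w : List Char) (hw : ∀ c ∈ w, c ≠ '\\') :
    pvRepl (o :: ot) new w = w := by
  have := pvRepl_free_prefix o ot new ho w [] hw
  simpa [pvRepl_nil] using this


-- table facts (checked on the literal tables)
theorem pv_words_free_b :
    pvAltWords.all (fun p => p.1.all (fun c => c != '\\') && p.2.all (fun c => c != '\\')) = true := by
  decide

theorem pv_words_free : ∀ p ∈ pvAltWords, (∀ c ∈ p.1, c ≠ '\\') ∧ (∀ c ∈ p.2, c ≠ '\\') := by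
  intro p hp
  have h := List.all_eq_true.mp pv_words_free_b p hp
  rw [Bool.and_eq_true] at h
  refine ⟨fun c hc => ?_, fun c hc => ?_⟩
  · have := List.all_eq_true.mp h.1 c hc; simpa using this
  · have := List.all_eq_true.mp h.2 c hc; simpa using this

theorem pv_words_noprefix_b :
    pvAltWords.all (fun p => pvAltWords.all
      (fun q => decide (p.1 = q.1) || !(p.1.isPrefixOf q.1))) = true := by
  decide

theorem pv_words_noprefix : ∀ p ∈ pvAltWords, ∀ q ∈ pvAltWords, p.1 ≠ q.1 → ¬ p.1 <+: q.1 := by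
  intro p hp q hq hne hpre
  have h := List.all_eq_true.mp (List.all_eq_true.mp pv_words_noprefix_b p hp) q hq
  rw [Bool.or_eq_true] at h
  rcases h with h | h
  · exact hne (of_decide_eq_true h)
  · rw [Bool.not_eq_eq_eq_not, Bool.not_true] at h
    rw [← List.isPrefixOf_iff_prefix] at hpre
    simp [h] at hpre

theorem pv_table_fst_nodup : (pvTable.map Prod.fst).Nodup := by decide

theorem pv_tokwords_eq : pvTokWords = pvAltWords.map Prod.fst := by decide

theorem pv_table_shape : ∀ p ∈ pvTable, ∃ wv, wv ∈ pvAltWords ∧ p = ('\\' :: wv.1, wv.2) := by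
  intro p hp
  simp only [pvTable, List.mem_map] at hp
  obtain ⟨a, ha, rfl⟩ := hp
  exact ⟨a, ha, rfl⟩

theorem pvFoldT_cons (p : List Char × List Char) (L : List (List Char × List Char)) (s : List Char) :
    pvFoldT (p :: L) s = pvFoldT L (pvRepl p.1 p.2 s) := rfl

theorem pvFoldT_free_prefix (L : List (List Char × List Char)) (hsub : ∀ p ∈ L, p ∈ pvTable)
    (w : List Char) (hw : ∀ c ∈ w, c ≠ '\\') :
    ∀ z, pvFoldT L (w ++ z) = w ++ pvFoldT L z := by
  induction L with
  | nil => intro z; rfl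
  | cons p L' ih =>
    intro z
    obtain ⟨wv, _hwv, rfl⟩ := pv_table_shape p (hsub p (by simp))
    rw [pvFoldT_cons, pvRepl_free_prefix '\\' wv.1 wv.2 rfl w z hw]
    exact ih (fun q hq => hsub q (by simp [hq])) (pvRepl ('\\' :: wv.1) wv.2 z)

theorem pvFoldT_free_id (L : List (List Char × List Char)) (hsub : ∀ p ∈ L, p ∈ pvTable)
    (w : List Char) (hw : ∀ c ∈ w, c ≠ '\\') : pvFoldT L w = w := by
  have hnil : pvFoldT L [] = [] := by
    induction L with
    | nil => rfl
    | cons p L' ih =>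
      rw [pvFoldT_cons, pvRepl_nil]
      exact ih (fun q hq => by exact (by exact hsub q (by simp [hq])))
  have := pvFoldT_free_prefix L hsub w hw []
  simpa [hnil] using this

theorem pv_prefix_ne_lt {a b : List Char} (h : a <+: b) (hne : a ≠ b) : a.length < b.length := by
  have hle := List.IsPrefix.length_le h
  rcases lt_or_eq_of_le hle with h' | h'
  · exact h'
  · exact absurd (List.IsPrefix.eq_of_length h h') hne

theorem pvFoldT_token (L : List (List Char × List Char)) (hsub : ∀ p ∈ L, p ∈ pvTable)
    (w v : List Char) (hwv : (w, v) ∈ pvAltWords)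
    (hmem : ('\\' :: w, v) ∈ L) (hcount : (L.map Prod.fst).count ('\\' :: w) = 1) :
    ∀ x, pvFoldT L ('\\' :: (w ++ x)) = v ++ pvFoldT L x := by
  induction L with
  | nil => simp at hmem
  | cons p L' ih =>
    intro x
    obtain ⟨⟨pw, pr⟩, hpwv, rfl⟩ := pv_table_shape p (hsub p (by simp))
    by_cases hpw : pw = w
    · subst hpw
      -- the matching pass fires
      have hrv : pr = v := by
        rcases List.mem_cons.mp hmem with heq | hmem'
        · exact (Prod.mk.injEq _ _ _ _ ▸ heq.symm).2
        · exfalso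
          have h1 : (L'.map Prod.fst).count ('\\' :: pw) ≥ 1 :=
            List.one_le_count_iff.mpr (List.mem_map_of_mem hmem')
          simp only [List.map_cons, List.count_cons_self] at hcount
          omega
      rw [hrv]
      have hcm : pvRepl ('\\' :: pw) v (('\\' :: pw) ++ x) = v ++ pvRepl ('\\' :: pw) v x :=
        pvRepl_cons_match '\\' pw v x
      have hx : ('\\' :: (pw ++ x)) = ('\\' :: pw) ++ x := by simp
      rw [hx, pvFoldT_cons, hcm]
      have hvfree : ∀ c ∈ v, c ≠ '\\' := (pv_words_free _ hwv).2
      rw [pvFoldT_free_prefix L' (fun q hq => hsub q (by simp [hq])) v hvfree]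
      rfl
    · -- a different pass walks through unchanged
      have hwmem : w ∈ pvAltWords.map Prod.fst := by
        have : ('\\' :: w, v) ∈ pvTable := hsub _ hmem
        obtain ⟨wv', hwv', heq⟩ := pv_table_shape _ this
        exact List.mem_map_of_mem hwv
      have hnm : ¬ ('\\' :: pw).isPrefixOf ('\\' :: (w ++ x)) := by
        rw [List.isPrefixOf_iff_prefix]
        intro hpre
        have : pw <+: w ++ x := (List.cons_prefix_cons.mp hpre).2
        rcases pv_prefix_append_split this with h1 | h1
        · exact pv_words_noprefix ⟨pw, pr⟩ hpwv ⟨w, v⟩ hwv hpw h1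
        · by_cases hwp : w = pw
          · exact hpw hwp.symm
          · exact pv_words_noprefix ⟨w, v⟩ hwv ⟨pw, pr⟩ hpwv hwp h1
      have hwfree : ∀ c ∈ w, c ≠ '\\' := (pv_words_free _ hwv).1
      rw [pvFoldT_cons, pvRepl_cons_no_match _ _ _ _ _ hnm,
        pvRepl_free_prefix '\\' pw pr rfl w x hwfree]
      have hmem' : ('\\' :: w, v) ∈ L' := by
        rcases List.mem_cons.mp hmem with heq | hmem'
        · exact absurd (congrArg Prod.fst heq).symm (by simp [hpw])
        · exact hmem'
      have hcount' : (L'.map Prod.fst).count ('\\' :: w) = 1 := by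
        simp only [List.map_cons] at hcount
        rwa [List.count_cons_of_ne (by simp [hpw])] at hcount
      exact ih (fun q hq => hsub q (by simp [hq])) hmem' hcount' (pvRepl ('\\' :: pw) pr x)

theorem pvFoldT_lone (L : List (List Char × List Char)) (hsub : ∀ p ∈ L, p ∈ pvTable)
    (u : List Char) (hu : ∀ c ∈ u, c ≠ '\\')
    (H1 : ∀ p ∈ L, ¬ p.1.tail <+: u)
    (H2 : ∀ p ∈ L, ¬ (u <+: p.1.tail ∧ u ≠ p.1.tail)) :
    ∀ z, pvFoldT L ('\\' :: (u ++ z)) = '\\' :: (u ++ pvFoldT L z) := by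
  induction L with
  | nil => intro z; rfl
  | cons p L' ih =>
    intro z
    obtain ⟨⟨pw, pr⟩, hpwv, rfl⟩ := pv_table_shape p (hsub p (by simp))
    have hnm : ¬ ('\\' :: pw).isPrefixOf ('\\' :: (u ++ z)) := by
      rw [List.isPrefixOf_iff_prefix]
      intro hpre
      have hp2 : pw <+: u ++ z := (List.cons_prefix_cons.mp hpre).2
      rcases pv_prefix_append_split hp2 with h1 | h1
      · exact H1 ('\\' :: pw, pr) (by simp) h1
      · by_cases hupw : u = pw
        · refine H1 ('\\' :: pw, pr) (by simp) ?_
          show pw <+: u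
          rw [hupw]
        · exact H2 ('\\' :: pw, pr) (by simp) ⟨h1, hupw⟩
    rw [pvFoldT_cons, pvRepl_cons_no_match _ _ _ _ _ hnm,
      pvRepl_free_prefix '\\' pw pr rfl u z hu]
    exact ih (fun q hq => hsub q (by simp [hq]))
      (fun q hq => H1 q (by simp [hq])) (fun q hq => H2 q (by simp [hq])) (pvRepl ('\\' :: pw) pr z)

theorem pvFoldT_lone_end (L : List (List Char × List Char)) (hsub : ∀ p ∈ L, p ∈ pvTable)
    (u : List Char) (hu : ∀ c ∈ u, c ≠ '\\')
    (H1 : ∀ p ∈ L, ¬ p.1.tail <+: u) :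
    pvFoldT L ('\\' :: u) = '\\' :: u := by
  induction L with
  | nil => rfl
  | cons p L' ih =>
    obtain ⟨⟨pw, pr⟩, hpwv, rfl⟩ := pv_table_shape p (hsub p (by simp))
    have hnm : ¬ ('\\' :: pw).isPrefixOf ('\\' :: u) := by
      rw [List.isPrefixOf_iff_prefix]
      intro hpre
      exact H1 ('\\' :: pw, pr) (by simp) (List.cons_prefix_cons.mp hpre).2
    rw [pvFoldT_cons, pvRepl_cons_no_match _ _ _ _ _ hnm,
      pvRepl_free_id '\\' pw pr rfl u hu]
    exact ih (fun q hq => hsub q (by simp [hq])) (fun q hq => H1 q (by simp [hq]))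


theorem pvCore_nil : pvCore [] = [] := by rw [pvCore.eq_def]

theorem pvCore_cons_ne (c : Char) (t : List Char) (hc : c ≠ '\\') :
    pvCore (c :: t) = c :: pvCore t := by
  rw [pvCore.eq_def]; simp [hc]

theorem pvCore_bs_none (t : List Char) (h : pvFindWord pvAltWords t = none) :
    pvCore ('\\' :: t) = pvCore t := by
  rw [pvCore.eq_def]; simp [h]

theorem pvCore_bs_some (t w v : List Char) (h : pvFindWord pvAltWords t = some (w, v)) :
    pvCore ('\\' :: t) = v ++ pvCore (t.drop w.length) := by
  rw [pvCore.eq_def]; simp [h]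

theorem pvCore_free_prefix : ∀ (u : List Char), (∀ c ∈ u, c ≠ '\\') →
    ∀ z, pvCore (u ++ z) = u ++ pvCore z := by
  intro u
  induction u with
  | nil => intro _ z; rfl
  | cons c u' ih =>
    intro hu z
    rw [List.cons_append, pvCore_cons_ne c _ (hu c (by simp)), ih (fun a ha => hu a (by simp [ha])) z]
    simp

theorem pvCore_free_id (u : List Char) (hu : ∀ c ∈ u, c ≠ '\\') : pvCore u = u := by
  have := pvCore_free_prefix u hu []
  simpa [pvCore_nil] using this

theorem pvFindWord_some : ∀ (L : List (List Char × List Char)) (t w v : List Char),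
    pvFindWord L t = some (w, v) → w <+: t ∧ (w, v) ∈ L := by
  intro L
  induction L with
  | nil => intro t w v h; simp [pvFindWord] at h
  | cons p L' ih =>
    intro t w v h
    obtain ⟨pw, pr⟩ := p
    rw [pvFindWord] at h
    by_cases hpre : pw.isPrefixOf t
    · simp [hpre] at h
      exact ⟨h.1 ▸ List.isPrefixOf_iff_prefix.mp hpre, by simp [h.1, h.2]⟩
    · simp [hpre] at h
      obtain ⟨h1, h2⟩ := ih t w v h
      exact ⟨h1, by simp [h2]⟩

theorem pvFindWord_none : ∀ (L : List (List Char × List Char)) (t : List Char),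
    pvFindWord L t = none → ∀ p ∈ L, ¬ p.1 <+: t := by
  intro L
  induction L with
  | nil => intro t _ p hp; simp at hp
  | cons q L' ih =>
    intro t h p hp
    obtain ⟨qw, qr⟩ := q
    rw [pvFindWord] at h
    by_cases hpre : qw.isPrefixOf t
    · simp [hpre] at h
    · simp [hpre] at h
      rcases List.mem_cons.mp hp with rfl | hp'
      · simpa [List.isPrefixOf_iff_prefix] using hpre
      · exact ih t h p hp'

theorem pv_hasBad_cons (c : Char) (t : List Char) :
    pvHasBad (c :: t) = (((c == '\\') && pvBadTail t) || pvHasBad t) := rfl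

theorem pv_hasBad_suffix : ∀ (s t' : List Char), t' <:+ s → pvHasBad s = false → pvHasBad t' = false := by
  intro s
  induction s with
  | nil => intro t' h _; rw [List.suffix_nil.mp h]; rfl
  | cons c t ih =>
    intro t' h hs
    rcases List.suffix_cons_iff.mp h with rfl | h'
    · exact hs
    · rw [pv_hasBad_cons] at hs
      simp only [Bool.or_eq_false_iff] at hs
      exact ih t' h' hs.2

theorem pv_dropWhile_head : ∀ (l : List Char) (p : Char → Bool) (c : Char) (t' : List Char),
    l.dropWhile p = c :: t' → p c = false := by
  intro l p
  induction l with
  | nil => intro c t' h; simp [List.dropWhile] at h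
  | cons a l' ih =>
    intro c t' h
    rw [List.dropWhile_cons] at h
    by_cases hpa : p a
    · simp [hpa] at h; exact ih c t' h
    · simp [hpa] at h
      rw [← h.1]
      simpa using hpa

theorem pv_filter_bs_cons (x : List Char) :
    List.filter (fun c => c != '\\') ('\\' :: x) = List.filter (fun c => c != '\\') x := by simp

theorem pv_filter_free (v : List Char) (hv : ∀ c ∈ v, c ≠ '\\') :
    v.filter (fun c => c != '\\') = v :=
  List.filter_eq_self.mpr (fun a ha => by simp [hv a ha])

theorem pv_main : ∀ (n : Nat) (s : List Char), s.length ≤ n → pvHasBad s = false →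
    (pvFoldT pvTable s).filter (fun c => c != '\\') = pvCore s := by
  intro n
  induction n with
  | zero =>
    intro s hl _
    have hs : s = [] := List.length_eq_zero_iff.mp (by omega)
    subst hs
    rw [pvFoldT_free_id pvTable (fun p hp => hp) [] (by simp), pvCore_nil]
    rfl
  | succ n ih =>
    intro s hl hbad
    cases s with
    | nil =>
      rw [pvFoldT_free_id pvTable (fun p hp => hp) [] (by simp), pvCore_nil]
      rfl
    | cons c t =>
      have hlt : t.length ≤ n := by simp at hl; omega
      by_cases hc : c = '\\'
      · subst hc
        have hbb : pvBadTail t = false ∧ pvHasBad t = false := by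
          rw [pv_hasBad_cons] at hbad
          simpa using hbad
        rcases hfw : pvFindWord pvAltWords t with _ | ⟨w, v⟩
        · -- lone backslash
          have hnone := pvFindWord_none pvAltWords t hfw
          have hufree : ∀ a ∈ t.takeWhile (fun c => c ≠ '\\'), a ≠ '\\' := by
            intro a ha
            have := List.mem_takeWhile_imp ha
            simpa using this
          have H1 : ∀ p ∈ pvTable, ¬ p.1.tail <+: t.takeWhile (fun c => c ≠ '\\') := by
            intro p hp hpre
            obtain ⟨⟨w', v'⟩, hwv', rfl⟩ := pv_table_shape p hp
            have hw't : w' <+: t := hpre.trans (List.takeWhile_prefix _)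
            exact hnone (w', v') hwv' hw't
          rcases hz : t.dropWhile (fun c => c ≠ '\\') with _ | ⟨zh, z'⟩
          · -- no further backslash in t
            have htu : t.takeWhile (fun c => c ≠ '\\') = t := by
              have := List.takeWhile_append_dropWhile (p := fun c => c ≠ '\\') (l := t)
              rw [hz] at this; simpa using this
            rw [pvCore_bs_none t hfw]
            have hfold : pvFoldT pvTable ('\\' :: t) = '\\' :: t := by
              have := pvFoldT_lone_end pvTable (fun p hp => hp) _ hufree H1
              rw [htu] at this
              exact this
            rw [hfold, pv_filter_bs_cons, pv_filter_free t (htu ▸ hufree),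
              pvCore_free_id t (htu ▸ hufree)]
          · -- another backslash follows: Pre_ gives that no token word prefix can straddle it
            have hzh : zh = '\\' := by
              have := pv_dropWhile_head t _ zh z' hz
              simpa using this
            have htuz : t.takeWhile (fun c => c ≠ '\\') ++ t.dropWhile (fun c => c ≠ '\\') = t :=
              List.takeWhile_append_dropWhile
            -- extract the proper-prefix exclusion from pvBadTail = false
            have hany : pvTokWords.any (fun w =>
                (t.takeWhile (fun c => c ≠ '\\')).isPrefixOf w &&
                (t.takeWhile (fun c => c ≠ '\\')).length < w.length) = false := by
              have hb := hbb.1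
              rw [pvBadTail] at hb
              have hc1 : (pvTokWords.any (fun w => w.isPrefixOf t)) = false := by
                rw [List.any_eq_false]
                intro w hw
                simp only [Bool.not_eq_true]
                rw [← Bool.not_eq_true, List.isPrefixOf_iff_prefix]
                -- need ¬ w <+: t for w ∈ pvTokWords
                rw [pv_tokwords_eq] at hw
                obtain ⟨p, hp, rfl⟩ := List.mem_map.mp hw
                exact hnone p hp
              rw [hc1] at hb
              simp only [Bool.not_false, Bool.true_and] at hb
              rw [hz] at hb
              simpa using hb
            have H2 : ∀ p ∈ pvTable,
                ¬ (t.takeWhile (fun c => c ≠ '\\') <+: p.1.tail ∧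
                   t.takeWhile (fun c => c ≠ '\\') ≠ p.1.tail) := by
              intro p hp ⟨hpre, hne⟩
              obtain ⟨⟨w', v'⟩, hwv', rfl⟩ := pv_table_shape p hp
              simp only [List.tail_cons] at hpre hne
              have hw'mem : w' ∈ pvTokWords := by
                rw [pv_tokwords_eq]
                exact List.mem_map_of_mem hwv'
              have hthis := List.any_eq_false.mp hany _ hw'mem
              have hb1 : (List.takeWhile (fun c => decide (c ≠ '\\')) t).isPrefixOf w' = true :=
                List.isPrefixOf_iff_prefix.mpr hpre
              have hb2 : decide ((List.takeWhile (fun c => decide (c ≠ '\\')) t).length < w'.length) = true :=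
                decide_eq_true (pv_prefix_ne_lt hpre hne)
              rw [hb1, hb2] at hthis
              simp at hthis
            have hfold : pvFoldT pvTable ('\\' :: t) =
                '\\' :: (t.takeWhile (fun c => c ≠ '\\') ++
                  pvFoldT pvTable (t.dropWhile (fun c => c ≠ '\\'))) := by
              have := pvFoldT_lone pvTable (fun p hp => hp) _ hufree H1 H2
                (t.dropWhile (fun c => c ≠ '\\'))
              rw [htuz] at this
              exact this
            rw [hfold, pv_filter_bs_cons, List.filter_append, pv_filter_free _ hufree]
            have hzlen : (t.dropWhile (fun c => c ≠ '\\')).length ≤ n := by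
              have hsuf : t.dropWhile (fun c => c ≠ '\\') <:+ t := ⟨_, htuz⟩
              have := List.IsSuffix.length_le hsuf
              omega
            have hzbad : pvHasBad (t.dropWhile (fun c => c ≠ '\\')) = false :=
              pv_hasBad_suffix t _ ⟨_, htuz⟩ hbb.2
            rw [ih _ hzlen hzbad]
            rw [pvCore_bs_none t hfw]
            conv_rhs => rw [← htuz]
            rw [pvCore_free_prefix _ hufree]
        · -- token at the head
          obtain ⟨hwpre, hwv⟩ := pvFindWord_some pvAltWords t w v hfw
          obtain ⟨x, hx⟩ := hwpre
          have hmem : ('\\' :: w, v) ∈ pvTable := List.mem_map_of_mem hwv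
          have hcount : (pvTable.map Prod.fst).count ('\\' :: w) = 1 :=
            List.count_eq_one_of_mem pv_table_fst_nodup (List.mem_map_of_mem hmem)
          have hfold : pvFoldT pvTable ('\\' :: t) = v ++ pvFoldT pvTable x := by
            have := pvFoldT_token pvTable (fun p hp => hp) w v hwv hmem hcount x
            rw [hx] at this
            exact this
          rw [hfold, List.filter_append, pv_filter_free v (pv_words_free _ hwv).2]
          have hxd : t.drop w.length = x := by rw [← hx]; simp
          rw [pvCore_bs_some t w v hfw, hxd]
          have hxlen : x.length ≤ n := by
            have : t.length = w.length + x.length := by rw [← hx]; simp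
            omega
          have hxbad : pvHasBad x = false := by
            refine pv_hasBad_suffix t x ⟨w, hx⟩ hbb.2
          rw [ih x hxlen hxbad]
      · -- ordinary character
        have hfold : pvFoldT pvTable (c :: t) = c :: pvFoldT pvTable t := by
          have := pvFoldT_free_prefix pvTable (fun p hp => hp) [c] (by simpa using hc) t
          simpa using this
        have hbadT : pvHasBad t = false := by
          rw [pv_hasBad_cons] at hbad
          exact (Bool.or_eq_false_iff.mp hbad).2
        rw [hfold, List.filter_cons]
        simp only [show ((c != '\\') = true) by simpa using hc, if_true]
        rw [ih t hlt hbadT, pvCore_cons_ne c t hc]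


-- ---- bridging Source B's split-based pass to the scan semantics pvCore ----

theorem pv_splitOn_eq (t : List Char) :
    List.splitOn '\\' t = List.splitOnP (fun c => c == '\\') t := rfl

theorem pv_splitOn_no_bs (t : List Char) (h : t.dropWhile (fun c => c ≠ '\\') = []) :
    List.splitOn '\\' t = [t] := by
  induction t with
  | nil => simp
  | cons c t' ih =>
    rw [List.dropWhile_cons] at h
    by_cases hc : c = '\\'
    · simp [hc] at h
    · simp only [hc, decide_not] at h
      rw [pv_splitOn_eq, List.splitOnP_cons]
      simp only [show (c == '\\') = false by simpa using hc, Bool.false_eq_true, if_false]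
      rw [← pv_splitOn_eq, ih (by simpa using h)]
      rfl

theorem pv_splitOn_bs (t t₂ : List Char) (h : t.dropWhile (fun c => c ≠ '\\') = '\\' :: t₂) :
    List.splitOn '\\' t = (t.takeWhile (fun c => c ≠ '\\')) :: List.splitOn '\\' t₂ := by
  induction t with
  | nil => simp at h
  | cons c t' ih =>
    rw [List.dropWhile_cons] at h
    by_cases hc : c = '\\'
    · subst hc
      simp only [show (decide (('\\' : Char) ≠ '\\')) = false by simp, Bool.false_eq_true, if_false] at h
      obtain ⟨rfl⟩ : t' = t₂ := by simpa using h
      rw [pv_splitOn_eq, List.splitOnP_cons, ← pv_splitOn_eq]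
      simp
    · simp only [show (decide (c ≠ '\\')) = true by simpa using hc, if_true] at h
      rw [pv_splitOn_eq, List.splitOnP_cons]
      simp only [show (c == '\\') = false by simpa using hc, Bool.false_eq_true, if_false]
      rw [← pv_splitOn_eq, ih h]
      rw [List.takeWhile_cons]
      simp [hc]

theorem pv_matchPart_eq : ∀ (L : List (List Char × List Char)) (t : List Char),
    pvMatchPart L t = (match pvFindWord L t with
      | some (w, v) => v ++ t.drop w.length
      | none => t) := by
  intro L
  induction L with
  | nil => intro t; rfl
  | cons p L' ih =>
    intro t
    obtain ⟨pw, pr⟩ := p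
    rw [pvMatchPart, pvFindWord]
    by_cases hpre : pw.isPrefixOf t
    · simp [hpre]
    · simp only [hpre, Bool.false_eq_true, if_false]
      exact ih t

theorem pv_matchPart_none (L : List (List Char × List Char)) (t : List Char)
    (h : pvFindWord L t = none) : pvMatchPart L t = t := by
  rw [pv_matchPart_eq, h]

theorem pv_matchPart_some (L : List (List Char × List Char)) (t w v : List Char)
    (h : pvFindWord L t = some (w, v)) : pvMatchPart L t = v ++ t.drop w.length := by
  rw [pv_matchPart_eq, h]

theorem pv_prefix_takeWhile {w t : List Char} {p : Char → Bool}
    (hw : w <+: t) (hall : ∀ c ∈ w, p c = true) : w <+: t.takeWhile p := by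
  induction w generalizing t with
  | nil => simp
  | cons a w' ih =>
    obtain ⟨r, rfl⟩ := hw
    rw [List.cons_append, List.takeWhile_cons]
    simp only [hall a (by simp), if_true]
    exact List.cons_prefix_cons.mpr ⟨rfl, ih (List.prefix_append w' r) (fun c hc => hall c (by simp [hc]))⟩

theorem pvFindWord_congr (L : List (List Char × List Char)) (t u : List Char)
    (h : ∀ p ∈ L, (p.1 <+: t ↔ p.1 <+: u)) : pvFindWord L t = pvFindWord L u := by
  induction L with
  | nil => rfl
  | cons p L' ih =>
    obtain ⟨pw, pr⟩ := p
    rw [pvFindWord, pvFindWord]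
    by_cases hpre : pw.isPrefixOf t
    · have : pw.isPrefixOf u := by
        rw [List.isPrefixOf_iff_prefix] at hpre ⊢
        exact (h (pw, pr) (by simp)).mp hpre
      simp [hpre, this]
    · have : ¬ pw.isPrefixOf u := by
        rw [List.isPrefixOf_iff_prefix] at hpre ⊢
        exact fun hu => hpre ((h (pw, pr) (by simp)).mpr hu)
      simp only [hpre, this, Bool.false_eq_true, if_false]
      exact ih (fun q hq => h q (by simp [hq]))

theorem pv_joined : ∀ (n : Nat) (t : List Char), t.length ≤ n →
    ((List.splitOn '\\' t).map (pvMatchPart pvAltWords)).flatten = pvCore ('\\' :: t) := by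
  intro n
  induction n with
  | zero =>
    intro t hl
    have ht : t = [] := List.length_eq_zero_iff.mp (by omega)
    subst ht
    rw [pvCore_bs_none [] (by rfl), pvCore_nil]
    simp
    rfl
  | succ n ih =>
    intro t hl
    rcases hdz : t.dropWhile (fun c => c ≠ '\\') with _ | ⟨zh, t₂⟩
    · -- no backslash in t: one fragment
      rw [pv_splitOn_no_bs t hdz]
      have hfree : ∀ c ∈ t, c ≠ '\\' := fun c hc => by
        have := List.dropWhile_eq_nil_iff.mp hdz c hc; simpa using this
      simp only [List.map_cons, List.map_nil, List.flatten_cons, List.flatten_nil, List.append_nil]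
      rcases hfw : pvFindWord pvAltWords t with _ | ⟨w, v⟩
      · rw [pv_matchPart_none pvAltWords t hfw, pvCore_bs_none t hfw, pvCore_free_id t hfree]
      · rw [pv_matchPart_some pvAltWords t w v hfw, pvCore_bs_some t w v hfw,
          pvCore_free_id (t.drop w.length) (fun c hc => hfree c (List.mem_of_mem_drop hc))]
    · -- a backslash splits t
      have hzh : zh = '\\' := by
        have := pv_dropWhile_head t _ zh t₂ hdz; simpa using this
      subst hzh
      rw [pv_splitOn_bs t t₂ hdz]
      simp only [List.map_cons, List.flatten_cons]
      have htuz : t.takeWhile (fun c => c ≠ '\\') ++ t.dropWhile (fun c => c ≠ '\\') = t :=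
        List.takeWhile_append_dropWhile
      have hufree : ∀ c ∈ t.takeWhile (fun c => c ≠ '\\'), c ≠ '\\' := by
        intro c hc
        have := List.mem_takeWhile_imp hc; simpa using this
      have hlen2 : t₂.length ≤ n := by
        have hsuf : t.dropWhile (fun c => c ≠ '\\') <:+ t := List.dropWhile_suffix _
        rw [hdz] at hsuf
        have := hsuf.length_le
        simp at this; omega
      rw [ih t₂ hlen2]
      have hiff : ∀ p ∈ pvAltWords, (p.1 <+: t ↔ p.1 <+: t.takeWhile (fun c => c ≠ '\\')) := by
        intro p hp
        constructor
        · intro hw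
          exact pv_prefix_takeWhile hw (fun c hc => by
            simp only [decide_eq_true_eq]
            exact (pv_words_free p hp).1 c hc)
        · intro hw
          exact hw.trans (List.takeWhile_prefix _)
      have hfwc : pvFindWord pvAltWords t =
          pvFindWord pvAltWords (t.takeWhile (fun c => c ≠ '\\')) :=
        pvFindWord_congr _ _ _ hiff
      rcases hfw : pvFindWord pvAltWords t with _ | ⟨w, v⟩
      · rw [hfw] at hfwc
        rw [pv_matchPart_none pvAltWords _ hfwc.symm]
        rw [pvCore_bs_none t hfw]
        conv_rhs => rw [← htuz, hdz]
        rw [pvCore_free_prefix _ hufree]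
      · rw [hfw] at hfwc
        rw [pv_matchPart_some pvAltWords _ w v hfwc.symm]
        obtain ⟨hwpre, hwv⟩ := pvFindWord_some pvAltWords t w v hfw
        have hwpu : w <+: t.takeWhile (fun c => c ≠ '\\') :=
          pv_prefix_takeWhile hwpre (fun c hc => by
            simp only [decide_eq_true_eq]
            exact (pv_words_free _ hwv).1 c hc)
        obtain ⟨u', hu'⟩ := hwpu
        rw [pvCore_bs_some t w v hfw]
        have htd : t.drop w.length = u' ++ ('\\' :: t₂) := by
          conv_lhs => rw [← htuz, hdz, ← hu']
          rw [List.append_assoc]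
          exact List.drop_left
        have hu'free : ∀ c ∈ u', c ≠ '\\' := by
          intro c hc
          exact hufree c (by rw [← hu']; simp [hc])
        have hud : (t.takeWhile (fun c => c ≠ '\\')).drop w.length = u' := by
          rw [← hu']; exact List.drop_left
        rw [htd, pvCore_free_prefix u' hu'free, hud, List.append_assoc]

-- ---- single-character replaces are a map / a filter ----

theorem pvRepl_single_map (a b : Char) : ∀ s, pvRepl [a] [b] s = s.map (fun c => if c = a then b else c) := by
  intro s
  induction s with
  | nil => simp [pvRepl_nil]
  | cons c t ih =>
    rw [pvRepl.eq_def]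
    by_cases hac : a = c
    · subst hac
      have hpre : [a].isPrefixOf (a :: t) = true := by simp [List.isPrefixOf]
      simp only [hpre, if_true, List.map_cons]
      simp [ih]
    · have hpre : [a].isPrefixOf (c :: t) = false := by simp [List.isPrefixOf]; exact hac
      simp only [hpre, Bool.false_eq_true, if_false, List.map_cons]
      rw [ih]
      simp [show ¬ (c = a) from fun h => hac h.symm]

theorem pvRepl_single_filter (a : Char) : ∀ s, pvRepl [a] [] s = s.filter (fun c => c != a) := by
  intro s
  induction s with
  | nil => simp [pvRepl_nil]
  | cons c t ih =>
    rw [pvRepl.eq_def]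
    by_cases hac : a = c
    · subst hac
      have hpre : [a].isPrefixOf (a :: t) = true := by simp [List.isPrefixOf]
      simp only [hpre, if_true, List.filter_cons]
      simp [ih]
    · have hpre : [a].isPrefixOf (c :: t) = false := by simp [List.isPrefixOf]; exact hac
      simp only [hpre, Bool.false_eq_true, if_false, List.filter_cons]
      rw [ih]
      simp [show (c != a) = true by simpa using (fun h => hac h.symm)]

-- ---- normalizing the two ports to character level ----

theorem pv_str_foldl : ∀ (l : List (String × String)) (q : String),
    (l.foldl (fun r p => PySem.Str.replace r p.1 p.2) q).toList =
    l.foldl (fun r p => PySem.Chars.replace r p.1.toList p.2.toList) q.toList := by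
  intro l
  induction l with
  | nil => intro q; rfl
  | cons p l' ih =>
    intro q
    rw [List.foldl_cons, List.foldl_cons, ih, PySem.Str.toList_replace]

theorem pv_chars_foldl : ∀ (l : List (String × String)), (∀ p ∈ l, p.1.toList ≠ []) →
    ∀ s, l.foldl (fun r p => PySem.Chars.replace r p.1.toList p.2.toList) s
      = pvFoldT (l.map (fun p => (p.1.toList, p.2.toList))) s := by
  intro l
  induction l with
  | nil => intro _ s; rfl
  | cons p l' ih =>
    intro h s
    rw [List.foldl_cons, List.map_cons, pvFoldT_cons,
      pv_replace_eq p.1.toList p.2.toList s (h p (by simp))]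
    exact ih (fun q hq => h q (by simp [hq])) _

theorem pvA_chars (q : String) :
    (prepare_query_py q).toList =
      PySem.Chars.strip (pvRepl ['\\'] [] (pvRepl ['}'] [')']
        (pvRepl ['{'] ['('] (pvFoldT pvTable q.toList)))) := by
  simp only [prepare_query_py]
  rw [PySem.Str.toList_strip, PySem.Str.toList_replace, PySem.Str.toList_replace,
    PySem.Str.toList_replace, pv_str_foldl, pv_chars_foldl _ (by decide)]
  rw [show (([("\\int", "integrate"), ("\\frac", ""), ("\\sqrt", "sqrt"), ("\\sin", "sin"),
     ("\\cos", "cos"), ("\\tan", "tan"), ("\\ln", "ln"), ("\\log", "log"),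
     ("\\pi", "pi"), ("\\infty", "infinity"), ("\\lim", "limit"), ("\\sum", "sum"),
     ("\\cdot", "*"), ("\\times", "*"), ("\\div", "/"), ("\\left", ""),
     ("\\right", ""), ("\\,", " "), ("\\;", " "), ("\\quad", " ")] :
       List (String × String)).map (fun p => (p.1.toList, p.2.toList))) = pvTable from by decide]
  rw [pv_replace_eq _ _ _ (by decide), pv_replace_eq _ _ _ (by decide),
    pv_replace_eq _ _ _ (by decide)]
  rw [show ("{".toList) = ['{'] from by decide, show ("(".toList) = ['('] from by decide,
    show ("}".toList) = ['}'] from by decide, show (")".toList) = [')'] from by decide,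
    show ("\\".toList) = ['\\'] from by decide, show ("".toList) = ([] : List Char) from by decide]

theorem pv_pieces_eq (s : List Char) :
    ((List.splitOn '\\' s).headD [] :: (List.splitOn '\\' s).tail.map (pvMatchPart pvAltWords)).flatten
      = pvCore s := by
  rcases hdz : s.dropWhile (fun c => c ≠ '\\') with _ | ⟨zh, t₂⟩
  · rw [pv_splitOn_no_bs s hdz]
    have hfree : ∀ c ∈ s, c ≠ '\\' := fun c hc => by
      have := List.dropWhile_eq_nil_iff.mp hdz c hc; simpa using this
    rw [pvCore_free_id s hfree]
    simp
  · have hzh : zh = '\\' := by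
      have := pv_dropWhile_head s _ zh t₂ hdz; simpa using this
    subst hzh
    rw [pv_splitOn_bs s t₂ hdz]
    simp only [List.headD_cons, List.tail_cons, List.flatten_cons]
    rw [pv_joined t₂.length t₂ (le_refl _)]
    have htuz : s.takeWhile (fun c => c ≠ '\\') ++ s.dropWhile (fun c => c ≠ '\\') = s :=
      List.takeWhile_append_dropWhile
    have hufree : ∀ c ∈ s.takeWhile (fun c => c ≠ '\\'), c ≠ '\\' := by
      intro c hc
      have := List.mem_takeWhile_imp hc; simpa using this
    conv_rhs => rw [← htuz, hdz]
    rw [pvCore_free_prefix _ hufree]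

theorem pvB_chars (q : String) :
    (prepare_query_py_alt q).toList = PySem.Chars.strip ((pvCore q.toList).map pvBraceChar) := by
  simp only [prepare_query_py_alt]
  rw [String.toList_ofList, pv_pieces_eq]

theorem pv_brace_comp :
    ((fun c => if c = '}' then ')' else c) ∘ (fun c => if c = '{' then '(' else c)) = pvBraceChar := by
  funext c
  by_cases h1 : c = '{'
  · subst h1; simp [pvBraceChar]
  · by_cases h2 : c = '}'
    · subst h2; simp [pvBraceChar]
    · simp [pvBraceChar, h1, h2]

theorem pv_brace_bs : ((fun c => c != '\\') ∘ pvBraceChar) = (fun c => c != '\\') := by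
  funext c
  by_cases h1 : c = '{'
  · subst h1; simp [pvBraceChar, Function.comp]
  · by_cases h2 : c = '}'
    · subst h2; simp [pvBraceChar, Function.comp]
    · simp [pvBraceChar, Function.comp, h1, h2]

-- ===== VERDICT (by name: the statement is the Claim_ definition above) =====
theorem prepare_query_py_spec : Claim_equal_prepare_query_py := by
  intro q _hdom hpre
  unfold Spec_prepare_query_py
  apply String.toList_inj.mp
  rw [pvA_chars, pvB_chars]
  rw [pvRepl_single_map '{' '(', pvRepl_single_map '}' ')', pvRepl_single_filter '\\']
  rw [List.map_map, pv_brace_comp, List.filter_map, pv_brace_bs]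
  rw [pv_main (q.toList).length q.toList (le_refl _) hpre]
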